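-- pv_equiv track=rewrite | github.com/Tiezhengyuan/algorithm_python | basic/transform_list.py | flat_list2_by_col
-- ===== SOURCE A (Python) =====
-- def flat_list2_by_col(input:list):
--     '''
--     convert matrix to list
--     '''
--     if input:
--         first, remaining = [], []
--         for i in input:
--             first.append(i[0])
--             if i[1:]:
--                 remaining.append(i[1:])
--         input = remaining
--         return first + flat_list2_by_col(input)
--     return []
-- ===== SOURCE B (Python) =====
-- def flat_list2_by_col(input: list):
--     '''
--     convert matrix to list
--     '''
--     n = max((len(row) for row in input), default=0)
--     return [row[c] for c in range(n) for row in input if c < len(row)]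
-- ===== Notes on version B (the rewrite author's own statement) =====
-- stated objective: faster
-- what changed: Replaces A's recursive peel-first-column-and-reslice-all-tails scheme by a direct column-index comprehension: compute the max row length once and emit row[c] for each column index c over the original rows, copying no sublists. (Pre_ excludes inputs with an empty row, where A raises IndexError.)
import Mathlib
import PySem

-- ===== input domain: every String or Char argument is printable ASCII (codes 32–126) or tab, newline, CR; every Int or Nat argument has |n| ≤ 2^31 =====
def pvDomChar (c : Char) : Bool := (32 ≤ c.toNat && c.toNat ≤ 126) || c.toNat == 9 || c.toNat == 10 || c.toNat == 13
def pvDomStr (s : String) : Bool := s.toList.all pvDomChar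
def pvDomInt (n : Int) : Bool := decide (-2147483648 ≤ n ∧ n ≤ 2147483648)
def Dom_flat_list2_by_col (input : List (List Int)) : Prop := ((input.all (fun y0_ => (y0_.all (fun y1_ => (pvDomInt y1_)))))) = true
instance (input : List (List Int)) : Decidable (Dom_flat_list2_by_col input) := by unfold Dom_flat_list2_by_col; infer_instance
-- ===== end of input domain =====

-- B replaces A's recursive peel-and-reslice scheme by a direct column-index comprehension (measured faster); A raises IndexError on empty rows (excluded by Pre_).

-- ===== PORT A =====
-- the body of A's for-loop: first.append(i[0]) (pyGet?: none = IndexError); i[1:] via slice, appended to remaining if nonempty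
def flatAF (acc : Option (List Int × List (List Int))) (i : List Int) : Option (List Int × List (List Int)) :=
  acc.bind (fun fr =>
    (PySem.List.pyGet? i 0).map (fun h =>
      let t := PySem.List.slice i (some 1) none
      (fr.1 ++ [h], if t ≠ [] then fr.2 ++ [t] else fr.2)))

-- one round of A's for-loop: builds (first, remaining)
def flatAStep (input : List (List Int)) : Option (List Int × List (List Int)) :=
  input.foldl flatAF (some ([], []))

-- A's recursion with a fuel guard (total element count bounds the number of rounds);
-- none propagates Python's IndexError on an empty row
def flatAGo : Nat → List (List Int) → Option (List Int)
  | _, [] => some []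
  | 0, _ => none
  | fuel+1, input =>
    match flatAStep input with
    | none => none
    | some (first, remaining) => (flatAGo fuel remaining).map (fun rest => first ++ rest)

def flat_list2_by_col (input : List (List Int)) : List Int :=
  (flatAGo ((input.map List.length).sum + 1) input).getD []

-- ===== PORT B =====
-- n = max((len(row) for row in input), default=0); then [row[c] for c in range(n) for row in input if c < len(row)]
-- (range indices are nonnegative Nats, so the guarded getElem is exact for Python's row[c])
def flat_list2_by_col_alt (input : List (List Int)) : List Int :=
  let n := input.foldl (fun m r => max m r.length) 0
  (List.range n).flatMap (fun c =>
    input.filterMap (fun row => if h : c < row.length then some row[c] else none))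

-- ===== PRECONDITION & SPEC =====
-- Pre_ excludes exactly the inputs containing an empty row, on which A raises IndexError (i[0])
def Pre_flat_list2_by_col (input : List (List Int)) : Prop := ∀ r ∈ input, r ≠ []
instance (input : List (List Int)) : Decidable (Pre_flat_list2_by_col input) := by
  unfold Pre_flat_list2_by_col; infer_instance

def pvWitness_flat_list2_by_col : List (List Int) := [[1, 2], [3]]

def Spec_flat_list2_by_col (input : List (List Int)) (out : List Int) : Prop := out = flat_list2_by_col_alt input
instance (input : List (List Int)) (out : List Int) : Decidable (Spec_flat_list2_by_col input out) := by unfold Spec_flat_list2_by_col; infer_instance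

-- ===== CLAIM (what is proved, stated in full; the proofs are below) =====
def Claim_equal_flat_list2_by_col : Prop := ∀ (input : List (List Int)), Dom_flat_list2_by_col input → Pre_flat_list2_by_col input → Spec_flat_list2_by_col input (flat_list2_by_col input)

-- ===== LEMMAS AND PROOFS =====

-- what one round of A computes: the heads …
def pvFirsts (input : List (List Int)) : List Int := input.map (fun r => r.headI)
-- … and the nonempty tails
def pvRem (input : List (List Int)) : List (List Int) :=
  input.filterMap (fun r => if r.tail = [] then none else some r.tail)
-- the maximum row length, in foldr form
def pvMax (l : List (List Int)) : Nat := (l.map List.length).foldr max 0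

theorem pvFoldlMax (l : List (List Int)) : ∀ a : Nat,
    l.foldl (fun m r => max m r.length) a = max a (pvMax l) := by
  induction l with
  | nil => intro a; simp [pvMax]
  | cons r rs ih => intro a; simp only [List.foldl_cons, ih, pvMax, List.map_cons, List.foldr_cons]; omega

theorem pvFlatAFCons (f : List Int) (r : List (List Int)) (x : Int) (xs : List Int) :
    flatAF (some (f, r)) (x :: xs)
      = some (f ++ [x], if xs = [] then r else r ++ [xs]) := by
  simp only [flatAF, Option.bind_some, PySem.List.pyGet?_zero_cons, Option.map_some,
    PySem.List.slice_from_one, List.tail_cons]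
  by_cases hxs : xs = [] <;> simp [hxs]

theorem pvStepEq (input : List (List Int)) (h : ∀ r ∈ input, r ≠ []) : ∀ f r,
    input.foldl flatAF (some (f, r)) = some (f ++ pvFirsts input, r ++ pvRem input) := by
  induction input with
  | nil => intro f r; simp [pvFirsts, pvRem]
  | cons i is ih =>
    intro f r
    obtain ⟨x, xs, rfl⟩ : ∃ x xs, i = x :: xs := by
      cases i with
      | nil => exact absurd rfl (h _ (by simp))
      | cons x xs => exact ⟨x, xs, rfl⟩
    have hrest : ∀ r ∈ is, r ≠ [] := fun r hr => h r (by simp [hr])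
    rw [List.foldl_cons, pvFlatAFCons]
    by_cases hxs : xs = []
    · rw [if_pos hxs, ih hrest]
      subst hxs; simp [pvFirsts, pvRem]
    · rw [if_neg hxs, ih hrest]
      simp [pvFirsts, pvRem, hxs]

theorem pvRemPre (input : List (List Int)) : ∀ r ∈ pvRem input, r ≠ [] := by
  intro r hr
  simp only [pvRem, List.mem_filterMap] at hr
  obtain ⟨a, -, ha⟩ := hr
  by_cases h : a.tail = []
  · simp [h] at ha
  · simp only [h, if_false, Option.some.injEq] at ha
    exact ha ▸ h

theorem pvRemSum (input : List (List Int)) (h : ∀ r ∈ input, r ≠ []) :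
    ((pvRem input).map List.length).sum + input.length ≤ (input.map List.length).sum := by
  induction input with
  | nil => simp [pvRem]
  | cons i is ih =>
    have hi : 0 < i.length := List.length_pos_iff.mpr (h i (by simp))
    have htl : i.tail.length = i.length - 1 := List.length_tail ..
    have hrest := ih (fun r hr => h r (by simp [hr]))
    by_cases ht : i.tail = []
    · simp only [pvRem, List.filterMap_cons, ht, if_true] at *
      simp only [List.map_cons, List.sum_cons, List.length_cons]
      omega
    · have htl1 : 0 < i.tail.length := List.length_pos_iff.mpr ht
      simp only [pvRem, List.filterMap_cons, ht, if_false] at *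
      simp only [List.map_cons, List.sum_cons, List.length_cons]
      omega

theorem pvColZero (input : List (List Int)) (h : ∀ r ∈ input, r ≠ []) :
    input.filterMap (fun row => if h : 0 < row.length then some row[0] else none)
      = pvFirsts input := by
  induction input with
  | nil => simp [pvFirsts]
  | cons i is ih =>
    have hrest := ih (fun r hr => h r (by simp [hr]))
    cases i with
    | nil => exact absurd rfl (h _ (by simp))
    | cons x xs =>
      simp only [List.filterMap_cons, List.length_cons, Nat.succ_pos, dif_pos,
        List.getElem_cons_zero, pvFirsts, List.map_cons, List.headI_cons, hrest]

theorem pvColSucc (input : List (List Int)) (c : Nat) :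
    input.filterMap (fun row => if h : c + 1 < row.length then some row[c + 1] else none)
      = (pvRem input).filterMap (fun row => if h : c < row.length then some row[c] else none) := by
  induction input with
  | nil => simp [pvRem]
  | cons i is ih =>
    cases i with
    | nil =>
      simp only [pvRem, List.filterMap_cons, List.tail_nil, if_true] at ih ⊢
      simpa using ih
    | cons x xs =>
      by_cases hxs : xs = []
      · subst hxs
        simp only [pvRem, List.filterMap_cons, List.tail_cons, if_true] at ih ⊢
        simpa using ih
      · simp only [pvRem, List.filterMap_cons, List.tail_cons, hxs, if_false] at ih ⊢
        simp only [List.length_cons, Nat.add_lt_add_iff_right, List.getElem_cons_succ]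
        by_cases hc : c < xs.length
        · simp [hc, ih]
        · simp [hc, ih]

theorem pvMaxRem (input : List (List Int)) : pvMax (pvRem input) = pvMax input - 1 := by
  induction input with
  | nil => simp [pvRem, pvMax]
  | cons i is ih =>
    by_cases ht : i.tail = []
    · have hlen : i.length ≤ 1 := by cases i <;> simp_all
      simp only [pvRem, List.filterMap_cons, ht, if_true] at *
      simp only [pvMax, List.map_cons, List.foldr_cons] at *
      omega
    · have hlen : i.tail.length + 1 = i.length := by cases i <;> simp_all
      simp only [pvRem, List.filterMap_cons, ht, if_false] at *
      simp only [pvMax, List.map_cons, List.foldr_cons] at *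
      omega

theorem pvLeMax (input : List (List Int)) (r : List Int) (hr : r ∈ input) :
    r.length ≤ pvMax input := by
  induction input with
  | nil => simp at hr
  | cons i is ih =>
    simp only [pvMax, List.map_cons, List.foldr_cons]
    rcases List.mem_cons.mp hr with h | h
    · subst h; omega
    · have := ih h; simp only [pvMax] at this; omega

theorem pvAltEq (input : List (List Int)) :
    flat_list2_by_col_alt input = (List.range (pvMax input)).flatMap (fun c =>
      input.filterMap (fun row => if h : c < row.length then some row[c] else none)) := by
  simp [flat_list2_by_col_alt, pvFoldlMax]

theorem pvPeel (input : List (List Int)) (h : ∀ r ∈ input, r ≠ []) (hne : input ≠ []) :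
    flat_list2_by_col_alt input = pvFirsts input ++ flat_list2_by_col_alt (pvRem input) := by
  obtain ⟨i, is, rfl⟩ : ∃ i is, input = i :: is := by
    cases input with
    | nil => exact absurd rfl hne
    | cons i is => exact ⟨i, is, rfl⟩
  have hi : 0 < i.length := List.length_pos_iff.mpr (h i (by simp))
  have hmax : 1 ≤ pvMax (i :: is) := le_trans hi (pvLeMax _ i (by simp))
  rw [pvAltEq, pvAltEq, pvMaxRem]
  obtain ⟨m, hm⟩ : ∃ m, pvMax (i :: is) = m + 1 := ⟨pvMax (i :: is) - 1, by omega⟩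
  rw [hm]
  simp only [Nat.add_sub_cancel]
  rw [List.range_succ_eq_map]
  simp only [List.flatMap_cons, List.flatMap_map]
  congr 1
  · exact pvColZero _ h
  · apply List.flatMap_congr
    intro c _
    simpa [Nat.succ_eq_add_one] using pvColSucc (i :: is) c

theorem pvGoEq : ∀ (fuel : Nat) (input : List (List Int)), (∀ r ∈ input, r ≠ []) →
    (input.map List.length).sum < fuel →
    flatAGo fuel input = some (flat_list2_by_col_alt input) := by
  intro fuel
  induction fuel with
  | zero => intro input _ hlt; omega
  | succ n ih =>
    intro input hpre hlt
    cases input with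
    | nil => simp [flatAGo, flat_list2_by_col_alt]
    | cons i is =>
      have hstep : flatAStep (i :: is) = some (pvFirsts (i :: is), pvRem (i :: is)) := by
        simpa [flatAStep] using pvStepEq (i :: is) hpre [] []
      have hsum := pvRemSum (i :: is) hpre
      have hrec := ih (pvRem (i :: is)) (pvRemPre _) (by simp at hsum hlt ⊢; omega)
      simp only [flatAGo, hstep, hrec, Option.map_some]
      rw [pvPeel (i :: is) hpre (by simp)]

-- ===== VERDICT (by name: the statement is the Claim_ definition above) =====
theorem flat_list2_by_col_spec : Claim_equal_flat_list2_by_col := by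
  intro input _ hpre
  unfold Spec_flat_list2_by_col flat_list2_by_col
  rw [pvGoEq _ input hpre (by omega)]
  rfl
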